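-- pv_equiv track=rewrite | github.com/RavenMeld/superpowers-mcp | awesome_skills/condense.py | _first_paragraph
-- ===== SOURCE A (Python) =====
-- def _first_paragraph(text: str) -> str:
--     # Extract the first non-heading paragraph.
--     lines = [ln.rstrip() for ln in text.splitlines()]
--     # Skip initial headings and blank lines.
--     i = 0
--     while i < len(lines) and (not lines[i].strip() or lines[i].lstrip().startswith("#")):
--         i += 1
--     para: list[str] = []
--     while i < len(lines):
--         ln = lines[i].rstrip()
--         if not ln.strip():
--             break
--         if ln.lstrip().startswith("#"):
--             break
--         para.append(ln)
--         i += 1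
--     return " ".join(para).strip()
-- ===== SOURCE B (Python) =====
-- def _is_content(ln: str) -> bool:
--     return bool(ln.strip()) and not ln.lstrip().startswith("#")
--
-- def _first_paragraph(text: str) -> str:
--     # Group rstripped lines into consecutive runs by content/non-content,
--     # then return the first content run joined with spaces.
--     runs: list = []  # list of (is_content, [lines]) consecutive runs
--     for ln in (raw.rstrip() for raw in text.splitlines()):
--         c = _is_content(ln)
--         if runs and runs[-1][0] == c:
--             runs[-1][1].append(ln)
--         else:
--             runs.append((c, [ln]))
--     for c, run in runs:
--         if c:
--             return " ".join(run).strip()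
--     return ""
-- ===== Notes on version B (the rewrite author's own statement) =====
-- stated objective: alternative
-- what changed: Replaces A's index-based skip-then-collect while loops by a groupby-style decomposition: lines are partitioned once into consecutive content/non-content runs and the first content run is joined and returned.
import Mathlib
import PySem

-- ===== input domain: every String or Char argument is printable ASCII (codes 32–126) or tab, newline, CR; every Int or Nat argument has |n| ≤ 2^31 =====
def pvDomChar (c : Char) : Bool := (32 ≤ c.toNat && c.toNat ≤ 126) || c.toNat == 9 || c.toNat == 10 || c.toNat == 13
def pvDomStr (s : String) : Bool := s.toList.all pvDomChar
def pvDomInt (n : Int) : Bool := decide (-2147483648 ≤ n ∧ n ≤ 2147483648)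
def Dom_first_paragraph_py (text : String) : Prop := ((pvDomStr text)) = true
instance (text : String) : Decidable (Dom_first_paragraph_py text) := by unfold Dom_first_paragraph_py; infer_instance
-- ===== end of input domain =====

-- B replaces A's index-based skip-then-collect loops by a groupby-style decomposition
-- (partition lines into consecutive content/non-content runs, take the first content run);
-- objective: alternative structure, same cost.


-- ===== PORT A =====
-- first while loop of A: skip initial headings and blank lines
def pvSkip (lines : List String) : List String :=
  match lines with
  | [] => []
  | ln :: rest =>
    if PySem.Str.strip ln == "" || PySem.Str.startswith (PySem.Str.lstrip ln) "#" then
      pvSkip rest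
    else ln :: rest

-- second while loop of A: collect paragraph lines until a blank line or heading
def pvCollect (lines : List String) : List String :=
  match lines with
  | [] => []
  | l :: rest =>
    let ln := PySem.Str.rstrip l
    if PySem.Str.strip ln == "" then []
    else if PySem.Str.startswith (PySem.Str.lstrip ln) "#" then []
    else ln :: pvCollect rest

def first_paragraph_py (text : String) : String :=
  let lines := (PySem.Str.splitlines text).map PySem.Str.rstrip
  PySem.Str.strip (PySem.Str.join " " (pvCollect (pvSkip lines)))

-- ===== PORT B =====
-- B's predicate _is_content
def pvIsContent (ln : String) : Bool :=
  !(PySem.Str.strip ln == "") && !(PySem.Str.startswith (PySem.Str.lstrip ln) "#")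

-- B's run builder: append ln to the last run if its key matches, else start a new run
def pvPushRun : List (Bool × List String) → Bool → String → List (Bool × List String)
  | [], c, ln => [(c, [ln])]
  | [(c0, run)], c, ln =>
    if c0 == c then [(c0, run ++ [ln])] else [(c0, run), (c, [ln])]
  | r :: s :: rs, c, ln => r :: pvPushRun (s :: rs) c ln

-- B's first for loop: fold the lines into consecutive runs
def pvRuns (lines : List String) : List (Bool × List String) :=
  lines.foldl (fun runs ln => pvPushRun runs (pvIsContent ln) ln) []

-- B's second for loop: return the first content run, joined and stripped
def pvFirstTrue : List (Bool × List String) → String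
  | [] => ""
  | (c, run) :: rest =>
    if c then PySem.Str.strip (PySem.Str.join " " run) else pvFirstTrue rest

def first_paragraph_py_alt (text : String) : String :=
  pvFirstTrue (pvRuns ((PySem.Str.splitlines text).map PySem.Str.rstrip))

-- ===== PRECONDITION & SPEC =====
def Spec_first_paragraph_py (text : String) (out : String) : Prop := out = first_paragraph_py_alt text
instance (text : String) (out : String) : Decidable (Spec_first_paragraph_py text out) := by unfold Spec_first_paragraph_py; infer_instance

-- ===== CLAIM (what is proved, stated in full; the proofs are below) =====
def Claim_equal_first_paragraph_py : Prop := ∀ (text : String), Dom_first_paragraph_py text → Spec_first_paragraph_py text (first_paragraph_py text)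

-- ===== LEMMAS AND PROOFS =====

theorem pv_dw_idem {α : Type} (p : α → Bool) (l : List α) :
    (l.dropWhile p).dropWhile p = l.dropWhile p := by
  induction l with
  | nil => rfl
  | cons a l ih =>
    by_cases h : p a = true
    · simp [h, ih]
    · simp [h]

theorem pv_rstrip_idem (s : String) :
    PySem.Str.rstrip (PySem.Str.rstrip s) = PySem.Str.rstrip s := by
  simp [PySem.Str.rstrip, PySem.Chars.rstrip, pv_dw_idem]

-- pvSkip is dropWhile ¬content
theorem pvSkip_eq (lines : List String) :
    pvSkip lines = lines.dropWhile (fun l => !pvIsContent l) := by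
  induction lines with
  | nil => rfl
  | cons ln rest ih =>
    by_cases h1 : PySem.Str.strip ln == ""
    · simp [pvSkip, pvIsContent, h1, ih]
    · by_cases h2 : PySem.Chars.startswith (PySem.Chars.lstrip ln.toList) ['#'] = true
      · simp [pvSkip, pvIsContent, h1, h2, ih]
      · simp [pvSkip, pvIsContent, h1, h2]

-- pvCollect on already-rstripped lines is takeWhile content
theorem pvCollect_eq (lines : List String) (h : ∀ l ∈ lines, PySem.Str.rstrip l = l) :
    pvCollect lines = lines.takeWhile pvIsContent := by
  induction lines with
  | nil => rfl
  | cons l rest ih =>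
    have hl : PySem.Str.rstrip l = l := h l (by simp)
    by_cases h1 : PySem.Str.strip l == ""
    · simp [pvCollect, pvIsContent, hl, h1]
    · by_cases h2 : PySem.Chars.startswith (PySem.Chars.lstrip l.toList) ['#'] = true
      · simp [pvCollect, pvIsContent, hl, h1, h2]
      · simp [pvCollect, pvIsContent, hl, h1, h2, ih (fun x hx => h x (by simp [hx]))]

-- pushing into a list with at least one run before the last only touches the tail
theorem pvPushRun_append (pre : List (Bool × List String)) (t : Bool × List String)
    (c : Bool) (ln : String) :
    pvPushRun (pre ++ [t]) c ln = pre ++ pvPushRun [t] c ln := by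
  induction pre with
  | nil => rfl
  | cons r pre ih =>
    cases pre with
    | nil => rfl
    | cons s pre' => simpa [pvPushRun] using ih

-- top-down view of grouping into consecutive runs
def pvChunk : List String → List (Bool × List String)
  | [] => []
  | ln :: rest =>
    (pvIsContent ln, ln :: rest.takeWhile (fun l => pvIsContent l == pvIsContent ln)) ::
      pvChunk (rest.dropWhile (fun l => pvIsContent l == pvIsContent ln))
termination_by lines => lines.length
decreasing_by
  simp_wf
  have := List.length_dropWhile_le (fun l => pvIsContent l == pvIsContent ln) rest
  omega

theorem pvChunk_nil : pvChunk [] = [] := by rw [pvChunk.eq_def]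

theorem pvChunk_cons (ln : String) (rest : List String) :
    pvChunk (ln :: rest) =
      (pvIsContent ln, ln :: rest.takeWhile (fun l => pvIsContent l == pvIsContent ln)) ::
        pvChunk (rest.dropWhile (fun l => pvIsContent l == pvIsContent ln)) := by
  rw [pvChunk.eq_def]

-- a nonempty prefix of closed runs is untouched by the fold
theorem pvFold_pre (lines : List String) :
    ∀ (pre : List (Bool × List String)) (t : Bool × List String),
      lines.foldl (fun runs ln => pvPushRun runs (pvIsContent ln) ln) (pre ++ [t]) =
        pre ++ lines.foldl (fun runs ln => pvPushRun runs (pvIsContent ln) ln) [t] := by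
  induction lines with
  | nil => intro pre t; rfl
  | cons x xs ih =>
    intro pre t
    obtain ⟨c0, run⟩ := t
    simp only [List.foldl_cons]
    rw [pvPushRun_append]
    by_cases h : (c0 == pvIsContent x) = true
    · simp only [pvPushRun, h, if_pos]
      exact ih pre (c0, run ++ [x])
    · simp only [pvPushRun, h, if_neg, Bool.not_eq_true]
      have e1 := ih (pre ++ [(c0, run)]) (pvIsContent x, [x])
      have e2 := ih [(c0, run)] (pvIsContent x, [x])
      simp only [List.append_assoc, List.cons_append, List.nil_append,
        ] at e1 e2 ⊢
      rw [e1, e2]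

-- folding from a single open run with key c closes it at the first key change
theorem pvFold_single (lines : List String) :
    ∀ (c : Bool) (run : List String),
      lines.foldl (fun runs ln => pvPushRun runs (pvIsContent ln) ln) [(c, run)] =
        (c, run ++ lines.takeWhile (fun l => pvIsContent l == c)) ::
          pvChunk (lines.dropWhile (fun l => pvIsContent l == c)) := by
  induction lines with
  | nil => intro c run; simp [pvChunk_nil]
  | cons ln rest ih =>
    intro c run
    by_cases h : (pvIsContent ln == c) = true
    · have hc : (c == pvIsContent ln) = true := by
        cases c <;> cases hln : pvIsContent ln <;> simp_all
      simp only [List.foldl_cons, pvPushRun, hc, if_pos]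
      rw [ih c (run ++ [ln])]
      simp only [List.takeWhile_cons, List.dropWhile_cons, h, if_pos, List.append_assoc,
        List.cons_append, List.nil_append]
    · have hc : (c == pvIsContent ln) = false := by
        cases c <;> cases hln : pvIsContent ln <;> simp_all
      simp only [List.foldl_cons, pvPushRun, hc, Bool.false_eq_true, if_neg, not_false_iff]
      rw [show [(c, run), (pvIsContent ln, [ln])] = [(c, run)] ++ [(pvIsContent ln, [ln])] from rfl,
          pvFold_pre rest [(c, run)] (pvIsContent ln, [ln]),
          ih (pvIsContent ln) [ln]]
      simp only [List.singleton_append]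
      rw [← pvChunk_cons]
      have h2 : (pvIsContent ln == c) = false := by simpa using h
      simp [h2]

theorem pvRuns_eq_chunk (lines : List String) : pvRuns lines = pvChunk lines := by
  cases lines with
  | nil => rw [pvChunk_nil]; rfl
  | cons ln rest =>
    show rest.foldl (fun runs ln => pvPushRun runs (pvIsContent ln) ln)
        [(pvIsContent ln, [ln])] = _
    rw [pvFold_single rest (pvIsContent ln) [ln], pvChunk_cons]
    simp

-- main bridge: A's drop/take pipeline equals B's first-content-run selection
theorem pv_main : ∀ (n : Nat) (lines : List String), lines.length ≤ n →
    PySem.Str.strip (PySem.Str.join " "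
        ((lines.dropWhile (fun l => !pvIsContent l)).takeWhile pvIsContent)) =
      pvFirstTrue (pvChunk lines) := by
  intro n
  induction n with
  | zero =>
    intro lines h
    have : lines = [] := List.length_eq_zero_iff.mp (Nat.le_zero.mp h)
    subst this
    rw [pvChunk_nil]
    decide
  | succ n ih =>
    intro lines h
    cases lines with
    | nil => rw [pvChunk_nil]; decide
    | cons ln rest =>
      rw [pvChunk_cons]
      by_cases hc : pvIsContent ln = true
      · simp [pvFirstTrue, hc]
      · have hc' : pvIsContent ln = false := by simpa using hc
        have hp : (fun l => pvIsContent l == pvIsContent ln) = (fun l => !pvIsContent l) := by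
          funext l; rw [hc']; cases pvIsContent l <;> rfl
        rw [hp]
        have hlen : (rest.dropWhile (fun l => !pvIsContent l)).length ≤ n := by
          have h1 := List.length_dropWhile_le (fun l => !pvIsContent l) rest
          simp only [List.length_cons] at h
          omega
        have hdw : List.dropWhile (fun l => !pvIsContent l) (ln :: rest) =
            List.dropWhile (fun l => !pvIsContent l) rest := by
          simp [hc']
        rw [hdw, ← pv_dw_idem (fun l => !pvIsContent l) rest,
            ih (rest.dropWhile (fun l => !pvIsContent l)) hlen,
            pv_dw_idem (fun l => !pvIsContent l) rest]
        simp [pvFirstTrue, hc']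

theorem pv_rstrip_mem (text : String) :
    ∀ l ∈ (PySem.Str.splitlines text).map PySem.Str.rstrip, PySem.Str.rstrip l = l := by
  intro l hl
  simp only [List.mem_map] at hl
  obtain ⟨x, _, rfl⟩ := hl
  exact pv_rstrip_idem x

-- ===== VERDICT (by name: the statement is the Claim_ definition above) =====
theorem first_paragraph_py_spec : Claim_equal_first_paragraph_py := by
  intro text _
  show first_paragraph_py text = first_paragraph_py_alt text
  have hA : first_paragraph_py text = PySem.Str.strip (PySem.Str.join " "
      (pvCollect (pvSkip ((PySem.Str.splitlines text).map PySem.Str.rstrip)))) := rfl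
  have hB : first_paragraph_py_alt text =
      pvFirstTrue (pvRuns ((PySem.Str.splitlines text).map PySem.Str.rstrip)) := rfl
  rw [hA, hB, pvSkip_eq, pvCollect_eq _ (fun l hl =>
      pv_rstrip_mem text l ((List.dropWhile_sublist _).subset hl)),
    pvRuns_eq_chunk,
    pv_main ((PySem.Str.splitlines text).map PySem.Str.rstrip).length _ le_rfl]
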